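-- pv_equiv track=rewrite | github.com/intel/device-modeling-language | test/1.2/registers/T_par_over_endian.py | expected_data
-- ===== SOURCE A (Python) =====
-- def byte_at(offs, big_endian_regsize):
--     if big_endian_regsize:
--         i = offs % big_endian_regsize
--         return ((offs - i) + ((big_endian_regsize - 1) - i)) % 256
--     return offs % 256
--
-- def expected_data(offset, length, big_endian):
--     if big_endian:
--         if 0x1000000 <= offset:
--             big_endian_regsize = offset // 0x1000000
--         else:
--             big_endian_regsize = 4
--     else:
--         big_endian_regsize = None
--     return sum(
--         byte_at(offset + i, big_endian_regsize) << (i * 8)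
--         for i in range(length))
-- ===== SOURCE B (Python) =====
-- def expected_data(offset, length, big_endian):
--     # Select the byte function once, with the big-endian byte formula folded
--     # into a single expression: (o - i) + (r - 1 - i) == o + r - 1 - 2*i.
--     if big_endian:
--         r = offset >> 24 if offset >> 24 >= 1 else 4
--         byte = lambda o: (o + r - 1 - 2 * (o % r)) % 256
--     else:
--         byte = lambda o: o % 256
--     # Horner loop from the most significant byte down; no shift amounts.
--     acc = 0
--     i = length - 1
--     while i >= 0:
--         acc = acc * 256 + byte(offset + i)
--         i -= 1
--     return acc
-- ===== Notes on version B (the rewrite author's own statement) =====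
-- stated objective: alternative
-- what changed: B drops the byte_at helper and the shifted-byte sum: it selects a single byte-function up front (with the big-endian expression algebraically folded into o + r - 1 - 2*(o % r)) and accumulates the result with a Horner while-loop running from the most significant index down, with no shift amounts.
import Mathlib
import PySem

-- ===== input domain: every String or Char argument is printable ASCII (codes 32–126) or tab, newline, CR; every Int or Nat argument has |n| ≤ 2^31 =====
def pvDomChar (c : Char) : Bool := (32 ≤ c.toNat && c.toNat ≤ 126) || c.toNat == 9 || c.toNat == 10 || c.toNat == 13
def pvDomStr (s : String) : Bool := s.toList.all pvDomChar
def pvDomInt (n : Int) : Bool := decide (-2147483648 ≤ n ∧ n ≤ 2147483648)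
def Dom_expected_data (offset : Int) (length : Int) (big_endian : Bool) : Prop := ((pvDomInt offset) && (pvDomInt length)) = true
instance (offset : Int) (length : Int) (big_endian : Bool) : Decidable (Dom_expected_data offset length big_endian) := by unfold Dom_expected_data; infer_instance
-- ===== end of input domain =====

-- B drops the byte_at helper and the shifted-byte sum: it picks one byte function up
-- front (the big-endian formula folded into o + r - 1 - 2*(o % r)) and accumulates
-- with a Horner loop from the most significant index down (alternative, same cost).

-- ===== PORT A =====
-- byte_at: module helper of Source A; None regsize → Option.none
def byteAt (offs : Int) (big_endian_regsize : Option Int) : Int :=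
  match big_endian_regsize with
  | some r =>
      if r ≠ 0 then  -- Python truthiness of an int
        let i := PySem.Int.mod offs r
        PySem.Int.mod ((offs - i) + ((r - 1) - i)) 256
      else PySem.Int.mod offs 256
  | none => PySem.Int.mod offs 256

def expected_data (offset : Int) (length : Int) (big_endian : Bool) : Int :=
  let big_endian_regsize : Option Int :=
    if big_endian then
      if (0x1000000 : Int) ≤ offset then some (PySem.Int.floordiv offset 0x1000000)
      else some 4
    else none
  -- i ∈ range(length) is nonnegative, so (i*8).toNat is Python's exact shift amount
  ((PySem.List.pyRange 0 length 1).map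
    (fun i => byteAt (offset + i) big_endian_regsize <<< (i * 8).toNat)).sum

-- ===== PORT B =====
-- the while-loop of Source B: i runs length-1, …, 0; n counts the remaining iterations
def altLoop (byte : Int → Int) (offset : Int) : Nat → Int → Int
  | 0, acc => acc
  | Nat.succ k, acc => altLoop byte offset k (acc * 256 + byte (offset + k))

def expected_data_alt (offset : Int) (length : Int) (big_endian : Bool) : Int :=
  let byte : Int → Int :=
    if big_endian then
      -- 'offset >> 24' in Python is floor division by 2^24 (exact for every sign)
      let r := if 1 ≤ PySem.Int.floordiv offset 0x1000000
               then PySem.Int.floordiv offset 0x1000000 else 4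
      fun o => PySem.Int.mod (o + r - 1 - 2 * PySem.Int.mod o r) 256
    else fun o => PySem.Int.mod o 256
  altLoop byte offset length.toNat 0

-- ===== PRECONDITION & SPEC =====
def Spec_expected_data (offset : Int) (length : Int) (big_endian : Bool) (out : Int) : Prop := out = expected_data_alt offset length big_endian
instance (offset : Int) (length : Int) (big_endian : Bool) (out : Int) : Decidable (Spec_expected_data offset length big_endian out) := by unfold Spec_expected_data; infer_instance

-- ===== CLAIM (what is proved, stated in full; the proofs are below) =====
def Claim_equal_expected_data : Prop := ∀ (offset : Int) (length : Int) (big_endian : Bool), Dom_expected_data offset length big_endian → Spec_expected_data offset length big_endian (expected_data offset length big_endian)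

-- ===== LEMMAS AND PROOFS =====

-- the Horner loop equals the weighted byte sum
theorem altLoop_eq_sum (byte : Int → Int) (offset : Int) : ∀ (n : Nat) (acc : Int),
    altLoop byte offset n acc
      = acc * 256 ^ n + ((List.range n).map (fun k : Nat => byte (offset + (k : Int)) * (2 : Int) ^ (8 * k))).sum := by
  intro n
  induction n with
  | zero => intro acc; simp [altLoop]
  | succ n ih =>
      intro acc
      rw [altLoop, ih, List.range_succ]
      simp only [List.map_append, List.map_cons, List.map_nil, List.sum_append,
        List.sum_cons, List.sum_nil]
      have h256 : (256 : Int) ^ n = 2 ^ (8 * n) := by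
        rw [show (256 : Int) = 2 ^ 8 by norm_num, ← pow_mul]
      rw [pow_succ, h256]
      ring

theorem expected_data_eq (offset length : Int) (big_endian : Bool) :
    expected_data offset length big_endian = expected_data_alt offset length big_endian := by
  unfold expected_data expected_data_alt
  rw [PySem.List.pyRange_one, altLoop_eq_sum]
  simp only [sub_zero, zero_mul, zero_add, List.map_map]
  apply congrArg List.sum
  apply List.map_congr_left
  intro k _
  simp only [Function.comp]
  have hsh : (((k : Int)) * 8).toNat = 8 * k := by omega
  rw [hsh, Int.shiftLeft_eq]
  apply congrArg (· * (2 : Int) ^ (8 * k))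
  have hiff : (0x1000000 : Int) ≤ offset ↔ 1 ≤ PySem.Int.floordiv offset 0x1000000 := by
    rw [PySem.Int.le_floordiv_iff_mul_le (by norm_num : (0:Int) < 0x1000000)]
    omega
  cases big_endian with
  | false => simp [byteAt]
  | true =>
      by_cases h : (0x1000000 : Int) ≤ offset
      · have h1 : 1 ≤ PySem.Int.floordiv offset 0x1000000 := hiff.mp h
        have hr : PySem.Int.floordiv offset 0x1000000 ≠ 0 := by omega
        simp only [if_pos h, if_pos h1, byteAt, if_true, if_pos hr]
        congr 1
        ring
      · have h1 : ¬ 1 ≤ PySem.Int.floordiv offset 0x1000000 := fun hh => h (hiff.mpr hh)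
        simp only [if_neg h, if_neg h1, byteAt, if_true]
        norm_num
        congr 1
        ring

-- ===== VERDICT (by name: the statement is the Claim_ definition above) =====
theorem expected_data_spec : Claim_equal_expected_data := by
  intro offset length big_endian _
  exact expected_data_eq offset length big_endian
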